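-- pv_equiv track=rewrite | github.com/Bubupi27/BB-8 | Raspberry/Codi.py | overflow_case
-- ===== SOURCE A (Python) =====
-- def overflow_case(text):
--     groud = text
--     reformed_groud = ""
--     x1 = 0
--     clau = ""
--
--     if len(groud) > 18:
--         x2 = 0
--
--         while x1 < 4:
--             clau += groud[x1]
--             x1 += 1
--         clau_original = int(clau)
--         clau = int(clau)
--
--         while x2 < 18:
--             reformed_groud += groud[((clau + clau_original + x2) % len(groud))]
--             clau = (clau + clau_original + x2) % len(groud)
--             x2 += 1
--
--     if reformed_groud == "":
--         return groud
--     else: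
--         return reformed_groud
-- ===== SOURCE B (Python) =====
-- def overflow_case(text):
--     L = len(text)
--     if L > 18:
--         c = int(text[:4])
--         return ''.join(text[(2 * c + k * c + k * (k + 1) // 2) % L] for k in range(18))
--     return text
-- ===== Notes on version B (the rewrite author's own statement) =====
-- stated objective: alternative
-- what changed: Replaced the sequential index recurrence (a running clau threaded through 18 loop iterations) by a direct closed-form index (2*c + k*c + k*(k+1)//2) % len(text) for each of the 18 output positions, built with a join over range(18); the character-by-character prefix loop becomes a slice text[:4].
import Mathlib
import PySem

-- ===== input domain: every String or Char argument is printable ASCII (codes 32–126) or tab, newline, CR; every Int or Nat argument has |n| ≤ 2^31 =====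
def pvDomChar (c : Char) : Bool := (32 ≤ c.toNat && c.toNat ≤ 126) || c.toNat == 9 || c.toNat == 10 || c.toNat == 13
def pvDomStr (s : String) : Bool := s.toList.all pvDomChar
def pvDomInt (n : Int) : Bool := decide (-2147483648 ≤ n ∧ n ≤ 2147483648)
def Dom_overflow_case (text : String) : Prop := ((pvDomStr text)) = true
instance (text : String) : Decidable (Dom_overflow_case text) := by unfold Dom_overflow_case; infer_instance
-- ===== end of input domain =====

-- B replaces A's running-index recurrence by a closed-form index per output position (objective: alternative).

-- ===== PORT A =====
-- Literal transliteration of A. Indexing uses pyGetD with a default that is never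
-- reached: the first loop reads indices 0..3 (length > 18), the second loop reads
-- indices produced by `% len(groud)` with a positive length, always in range.
def overflow_case (text : String) : String :=
  let groud := text.toList
  if groud.length > 18 then
    -- while x1 < 4: clau += groud[x1]
    let clau : List Char :=
      (List.range 4).foldl (fun (s : List Char) (x1 : Nat) => s ++ [PySem.List.pyGetD groud (x1 : Int) ' ']) []
    match PySem.Int.ofChars? clau with
    | none => text   -- Python raises ValueError here; excluded by Pre_overflow_case
    | some c =>
      let L : Int := groud.length
      -- while x2 < 18: reformed += groud[(clau + clau_original + x2) % L]; clau := that index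
      let st :=
        (List.range 18).foldl
          (fun (p : Int × List Char) (x2 : Nat) =>
            let idx := PySem.Int.mod (p.1 + c + (x2 : Int)) L
            (idx, p.2 ++ [PySem.List.pyGetD groud idx ' ']))
          (c, [])
      let reformed := st.2
      if reformed = [] then text else String.ofList reformed
  else text

-- ===== PORT B =====
-- Transliteration of Source B: each output character is fetched at the closed-form
-- index (2*c + k*c + k*(k+1)//2) % L; k*(k+1)//2 is Nat division (exact, nonneg).
def overflow_case_alt (text : String) : String :=
  let g := text.toList
  let L : Int := g.length
  if g.length > 18 then
    match PySem.Int.ofChars? (PySem.List.slice g none (some 4)) with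
    | none => text   -- Python raises ValueError here; excluded by Pre_overflow_case
    | some c =>
      String.ofList <|
        (List.range 18).map (fun (k : Nat) =>
          PySem.List.pyGetD g
            (PySem.Int.mod (2 * c + (k : Int) * c + ((k * (k + 1) / 2 : Nat) : Int)) L) ' ')
  else text

-- ===== PRECONDITION & SPEC =====
-- Pre_ excludes exactly the inputs where A raises ValueError: length > 18 but the
-- first four characters do not parse as a Python int (B raises there as well).
def Pre_overflow_case (text : String) : Prop :=
  text.toList.length ≤ 18 ∨ (PySem.Int.ofChars? (text.toList.take 4)).isSome = true
instance (text : String) : Decidable (Pre_overflow_case text) := by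
  unfold Pre_overflow_case; infer_instance

def pvWitness_overflow_case : String := "1234abcdefghijklmnopqrs"

def Spec_overflow_case (text : String) (out : String) : Prop := out = overflow_case_alt text
instance (text : String) (out : String) : Decidable (Spec_overflow_case text out) := by
  unfold Spec_overflow_case; infer_instance

-- ===== CLAIM (what is proved, stated in full; the proofs are below) =====
def Claim_equal_overflow_case : Prop :=
  ∀ (text : String), Dom_overflow_case text → Pre_overflow_case text →
    Spec_overflow_case text (overflow_case text)

-- ===== LEMMAS AND PROOFS =====

-- closed-form index of B at position k
def pvIdx (c L : Int) (k : Nat) : Int :=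
  PySem.Int.mod (2 * c + (k : Int) * c + ((k * (k + 1) / 2 : Nat) : Int)) L

-- the running index A carries after n iterations of its second loop
def pvClau (c L : Int) : Nat → Int
  | 0 => c
  | n + 1 => pvIdx c L n

lemma pvTri_succ (n : Nat) : (n + 1) * (n + 2) / 2 = n * (n + 1) / 2 + (n + 1) := by
  have h : (n + 1) * (n + 2) = n * (n + 1) + (n + 1) * 2 := by ring
  rw [h, Nat.add_mul_div_right _ _ (by omega : 0 < 2)]

lemma pvStep (c L : Int) (hL : 0 < L) (n : Nat) :
    PySem.Int.mod (pvClau c L n + c + (n : Int)) L = pvIdx c L n := by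
  cases n with
  | zero => simp [pvClau, pvIdx]; ring_nf
  | succ m =>
      show PySem.Int.mod (pvIdx c L m + c + ((m + 1 : Nat) : Int)) L = pvIdx c L (m + 1)
      unfold pvIdx
      rw [PySem.Int.mod_eq_emod_of_pos hL, PySem.Int.mod_eq_emod_of_pos hL,
          PySem.Int.mod_eq_emod_of_pos hL, add_assoc, Int.emod_add_emod]
      congr 1
      rw [← add_assoc]
      have h2 : ((m + 1) * (m + 1 + 1) / 2 : Nat) = (m * (m + 1) / 2 : Nat) + (m + 1) := pvTri_succ m
      push_cast [h2]
      ring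

lemma pvLoop (g : List Char) (c L : Int) (hL : 0 < L) (n : Nat) :
    (List.range n).foldl
      (fun (p : Int × List Char) (x2 : Nat) =>
        (PySem.Int.mod (p.1 + c + (x2 : Int)) L,
         p.2 ++ [PySem.List.pyGetD g (PySem.Int.mod (p.1 + c + (x2 : Int)) L) ' ']))
      (c, []) =
    (pvClau c L n, (List.range n).map (fun k => PySem.List.pyGetD g (pvIdx c L k) ' ')) := by
  induction n with
  | zero => simp [pvClau]
  | succ m ih =>
      rw [List.range_succ, List.foldl_append, ih, List.map_append]
      simp only [List.foldl_cons, List.foldl_nil, List.map_cons, List.map_nil]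
      rw [pvStep c L hL m]
      rfl

lemma pvTake4 (g : List Char) (h : 4 ≤ g.length) :
    (List.range 4).foldl (fun (s : List Char) (x1 : Nat) => s ++ [PySem.List.pyGetD g (x1 : Int) ' ']) []
      = g.take 4 := by
  match g, h with
  | a :: b :: c :: d :: rest, _ =>
      simp [List.range_succ]

-- ===== VERDICT (by name: the statement is the Claim_ definition above) =====
theorem overflow_case_spec : Claim_equal_overflow_case := by
  intro text _ hpre
  unfold Spec_overflow_case overflow_case overflow_case_alt
  unfold Pre_overflow_case at hpre
  set g := text.toList with hg
  by_cases hlen : g.length > 18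
  · simp only [hlen, if_true]
    have h4 : 4 ≤ g.length := by omega
    have hclau : (List.range 4).foldl (fun (s : List Char) (x1 : Nat) => s ++ [PySem.List.pyGetD g (x1 : Int) ' ']) []
        = PySem.List.slice g none (some 4) := by
      rw [pvTake4 g h4]
      rw [show (4 : Int) = ((4 : Nat) : Int) by norm_num, PySem.List.slice_to_natCast]
    rw [hclau]
    cases hof : PySem.Int.ofChars? (PySem.List.slice g none (some 4)) with
    | none =>
        exfalso
        rcases hpre with h | h
        · omega
        · rw [show g.take 4 = PySem.List.slice g none (some 4) by
              rw [show (4 : Int) = ((4 : Nat) : Int) by norm_num, PySem.List.slice_to_natCast]] at h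
          rw [hof] at h; simp at h
    | some c =>
        dsimp only
        have hL : (0 : Int) < (g.length : Int) := by omega
        rw [pvLoop g c (g.length : Int) hL 18]
        have hne : (List.range 18).map (fun k => PySem.List.pyGetD g (pvIdx c (g.length : Int) k) ' ') ≠ [] := by
          simp [List.range_succ]
        rw [if_neg (by simpa using hne)]
        rfl
  · simp [hlen]
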